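-- pv_equiv track=rewrite | github.com/brnunez15/ayed1-2025-tps | TP3/ej2.py | patron_a
-- ===== SOURCE A (Python) =====
-- def copiar(m):
--     nueva = [[elem for elem in sublista] for sublista in m]
--     return nueva
--
-- def patron_a(m: list[list[int]]):
--     nueva = copiar(m)
--     largo = len(nueva)
--     n = 1
--     for f in range(largo):
--         for c in range(largo):
--             if f == c:
--                 nueva[f][c] = n
--                 n += 2
--     return nueva
-- ===== SOURCE B (Python) =====
-- def patron_a(m: list[list[int]]):
--     nueva = [list(fila) for fila in m]
--     for i in range(len(nueva)):
--         nueva[i][i] = 2 * i + 1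
--     return nueva
-- ===== Notes on version B (the rewrite author's own statement) =====
-- stated objective: simpler
-- what changed: Replaces the nested f/c double loop with the n += 2 accumulator by a single loop over the diagonal that writes the closed-form odd value 2*i+1.
import Mathlib
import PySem

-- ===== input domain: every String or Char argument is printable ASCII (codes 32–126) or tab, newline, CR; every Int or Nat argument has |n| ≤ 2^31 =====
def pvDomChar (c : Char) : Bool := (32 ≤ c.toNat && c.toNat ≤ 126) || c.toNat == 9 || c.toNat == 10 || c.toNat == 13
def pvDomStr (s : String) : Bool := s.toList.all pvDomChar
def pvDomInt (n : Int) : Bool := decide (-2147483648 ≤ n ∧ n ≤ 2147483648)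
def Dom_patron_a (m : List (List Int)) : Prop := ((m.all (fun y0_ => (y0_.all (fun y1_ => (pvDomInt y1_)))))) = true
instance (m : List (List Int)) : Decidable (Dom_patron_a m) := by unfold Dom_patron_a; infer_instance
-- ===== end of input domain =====

-- B replaces A's nested double loop with the `n += 2` accumulator by a single loop over the
-- diagonal writing the closed-form odd value 2*i+1 (objective: simpler).

-- ===== PORT A =====
-- copiar(m): fresh row-by-row copy
def copiarA (m : List (List Int)) : List (List Int) :=
  m.map (fun sublista => sublista.map (fun elem => elem))

def patron_a (m : List (List Int)) : List (List Int) :=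
  let nueva := copiarA m
  let largo : Int := nueva.length
  let st :=
    (PySem.List.pyRange 0 largo 1).foldl (fun st f =>
      (PySem.List.pyRange 0 largo 1).foldl (fun st c =>
        if f == c then
          (PySem.List.pySetD st.1 f (PySem.List.pySetD (PySem.List.pyGetD st.1 f []) c st.2),
           st.2 + 2)
        else st) st) (nueva, (1 : Int))
  st.1

-- ===== PORT B =====
def patron_a_alt (m : List (List Int)) : List (List Int) :=
  let nueva := m.map (fun fila => fila)
  (PySem.List.pyRange 0 (nueva.length : Int) 1).foldl (fun nv i =>
    PySem.List.pySetD nv i (PySem.List.pySetD (PySem.List.pyGetD nv i []) i (2 * i + 1))) nueva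

-- ===== PRECONDITION & SPEC =====
-- Pre_ excludes exactly the ragged inputs where row i is shorter than i+1: there Python's
-- nueva[f][c] = n raises IndexError (in both A and B).
def Pre_patron_a (m : List (List Int)) : Prop :=
  (m.zipIdx.all (fun p => p.2 + 1 ≤ p.1.length)) = true

instance (m : List (List Int)) : Decidable (Pre_patron_a m) := by
  unfold Pre_patron_a; infer_instance

def pvWitness_patron_a : List (List Int) := [[7, 8], [9, 10]]

def Spec_patron_a (m : List (List Int)) (out : List (List Int)) : Prop := out = patron_a_alt m
instance (m : List (List Int)) (out : List (List Int)) : Decidable (Spec_patron_a m out) := by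
  unfold Spec_patron_a; infer_instance

-- ===== CLAIM (what is proved, stated in full; the proofs are below) =====
def Claim_equal_patron_a : Prop :=
  ∀ (m : List (List Int)), Dom_patron_a m → Pre_patron_a m → Spec_patron_a m (patron_a m)

-- ===== LEMMAS AND PROOFS =====

-- a fold whose step only acts when f == c is the identity on a list avoiding f
theorem foldl_skip {σ : Type} (f : Int) (g : σ → Int → σ) :
    ∀ (l : List Int), (∀ c ∈ l, (f == c) = false) → ∀ (st : σ),
      l.foldl (fun st c => if f == c then g st c else st) st = st := by
  intro l
  induction l with
  | nil => intro _ st; rfl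
  | cons c l ih =>
    intro h st
    simp only [List.foldl_cons, h c (by simp)]
    exact ih (fun c hc => h c (by simp [hc])) st

-- A's inner loop at row f picks out exactly the diagonal write
theorem innerA (largo f : Int) (hf0 : 0 ≤ f) (hf : f < largo)
    (nv : List (List Int)) (n : Int) :
    (PySem.List.pyRange 0 largo 1).foldl (fun st c =>
        if f == c then
          (PySem.List.pySetD st.1 f (PySem.List.pySetD (PySem.List.pyGetD st.1 f []) c st.2),
           st.2 + 2)
        else st) (nv, n)
      = (PySem.List.pySetD nv f (PySem.List.pySetD (PySem.List.pyGetD nv f []) f n), n + 2) := by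
  rw [PySem.List.pyRange_one_append 0 f largo hf0 (le_of_lt hf),
      PySem.List.pyRange_one_cons hf, List.foldl_append, List.foldl_cons]
  rw [foldl_skip f _ _ (by intro c hc; rw [PySem.List.mem_pyRange_one] at hc; simp; omega)]
  simp only [beq_self_eq_true, if_true]
  rw [foldl_skip f _ _ (by intro c hc; rw [PySem.List.mem_pyRange_one] at hc; simp; omega)]

-- A's outer loop from a with accumulator 2*a+1 computes B's single diagonal loop
theorem outerA (largo : Int) :
    ∀ (k : Nat) (a : Int), 0 ≤ a → largo - a = (k : Int) →
    ∀ (nv : List (List Int)),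
    ((PySem.List.pyRange a largo 1).foldl (fun st f =>
        (PySem.List.pyRange 0 largo 1).foldl (fun st c =>
          if f == c then
            (PySem.List.pySetD st.1 f (PySem.List.pySetD (PySem.List.pyGetD st.1 f []) c st.2),
             st.2 + 2)
          else st) st) (nv, 2 * a + 1)).1
      = (PySem.List.pyRange a largo 1).foldl (fun nv i =>
          PySem.List.pySetD nv i (PySem.List.pySetD (PySem.List.pyGetD nv i []) i (2 * i + 1))) nv := by
  intro k
  induction k with
  | zero =>
    intro a _ hk nv
    rw [PySem.List.pyRange_one_eq_nil (a := a) (b := largo) (by omega)]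
    rfl
  | succ k ih =>
    intro a ha hk nv
    rw [PySem.List.pyRange_one_cons (a := a) (b := largo) (by omega), List.foldl_cons, List.foldl_cons,
        innerA largo a ha (by omega)]
    have := ih (a + 1) (by omega) (by omega)
      (PySem.List.pySetD nv a (PySem.List.pySetD (PySem.List.pyGetD nv a []) a (2 * a + 1)))
    rw [show 2 * a + 1 + 2 = 2 * (a + 1) + 1 by ring] at *
    exact this

-- ===== VERDICT (by name: the statement is the Claim_ definition above) =====
theorem patron_a_spec : Claim_equal_patron_a := by
  intro m _ _
  unfold Spec_patron_a patron_a patron_a_alt copiarA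
  simp only [List.map_id']
  have h := outerA (m.length : Int) m.length 0 (by omega) (by omega) m
  simpa using h
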